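-- pv_equiv track=rewrite | github.com/rasmusnorup/MachineHandin3 | GenomeReader.py | codonGenomeToIndices
-- ===== SOURCE A (Python) =====
-- import itertools
--
-- def codonGenomeToIndices(genome,states):
--     result = []
--     perms = [''.join(i) for i in itertools.product("ACGT", repeat=3)]
--     singleMap = {'A': 0, 'C': 1, 'G': 2, 'T': 3}
--     mapping = dict(zip(perms, range(4, 68)))
--     j = 0
--     for i in range(0, len(states)):
--         if states[i] == 0:
--             result.append(singleMap[genome[j]])
--             j += 1
--         else:
--             result.append(mapping[genome[j] + genome[j + 1] + genome[j + 2]])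
--             j += 3
--     return result
-- ===== SOURCE B (Python) =====
-- def codonGenomeToIndices(genome, states):
--     # Stage 1: cut the consumed prefix of the genome into tokens of width 1 or 3.
--     tokens = []
--     pos = 0
--     for s in states:
--         w = 1 if s == 0 else 3
--         tokens.append(genome[pos:pos + w])
--         pos += w
--     # Stage 2: Horner-evaluate each token in base 4; width-3 tokens are offset by 4.
--     result = []
--     for t in tokens:
--         v = 0
--         for c in t:
--             v = 4 * v + "ACGT".index(c)
--         result.append(v if len(t) == 1 else v + 4)
--     return result
-- ===== Notes on version B (the rewrite author's own statement) =====
-- stated objective: alternative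
-- what changed: Replaces A's single indexed loop with dict lookups (precomputed 64-entry permutation mapping, running pointer j) by two staged passes: first slice the genome into width-1/width-3 tokens driven by states, then Horner-evaluate every token uniformly in base 4 with an inner fold, offsetting width-3 tokens by 4.
import Mathlib
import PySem

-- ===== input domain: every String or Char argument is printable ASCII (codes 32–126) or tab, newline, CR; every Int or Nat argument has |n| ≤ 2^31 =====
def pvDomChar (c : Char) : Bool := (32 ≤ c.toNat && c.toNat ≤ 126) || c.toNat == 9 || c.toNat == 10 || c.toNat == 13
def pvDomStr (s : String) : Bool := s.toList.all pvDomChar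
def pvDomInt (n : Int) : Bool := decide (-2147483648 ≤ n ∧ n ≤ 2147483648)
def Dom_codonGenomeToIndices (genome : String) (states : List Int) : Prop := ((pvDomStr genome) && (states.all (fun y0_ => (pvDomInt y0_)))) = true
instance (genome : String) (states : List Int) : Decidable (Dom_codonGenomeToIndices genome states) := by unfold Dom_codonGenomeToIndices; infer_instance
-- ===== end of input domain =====

-- B replaces A's single indexed loop with dict lookups by two staged passes: slice the
-- genome into width-1/width-3 tokens, then Horner-evaluate each token in base 4 (objective: simpler).

-- ===== PORT A =====
-- perms = [''.join(i) for i in itertools.product("ACGT", repeat=3)]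
def pvPerms : List String :=
  (("ACGT".toList).flatMap fun a => ("ACGT".toList).flatMap fun b =>
    ("ACGT".toList).map fun c => String.ofList [a, b, c])

def pvSingleMap : PySem.Dict Char Int :=
  PySem.Dict.ofList [('A', 0), ('C', 1), ('G', 2), ('T', 3)]

-- mapping = dict(zip(perms, range(4, 68)))
def pvMapping : PySem.Dict String Int :=
  PySem.Dict.ofList (pvPerms.zip (PySem.List.pyRange 4 68 1))

-- the for-loop over range(len(states)); raising lookups become Option (none = exception)
def pvALoop (g : List Char) : List Int → Int → Option (List Int)
  | [], _ => some []
  | s :: rest, j =>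
    if s == 0 then
      ((PySem.List.pyGet? g j).bind (fun c => pvSingleMap.get? c)).bind fun v =>
        (pvALoop g rest (j + 1)).map (v :: ·)
    else
      ((PySem.List.pyGet? g j).bind fun c0 =>
        (PySem.List.pyGet? g (j + 1)).bind fun c1 =>
          (PySem.List.pyGet? g (j + 2)).bind fun c2 =>
            pvMapping.get? (String.ofList [c0, c1, c2])).bind fun v =>
        (pvALoop g rest (j + 3)).map (v :: ·)

def codonGenomeToIndices (genome : String) (states : List Int) : List Int :=
  (pvALoop genome.toList states 0).getD []

-- ===== PORT B =====
-- Stage 1: tokens.append(genome[pos:pos+w]); pos += w   (string slices never raise)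
def pvTokens (g : List Char) : List Int → Int → List (List Char)
  | [], _ => []
  | s :: rest, pos =>
    let w : Int := if s == 0 then 1 else 3
    PySem.List.slice g (some pos) (some (pos + w)) :: pvTokens g rest (pos + w)

-- "ACGT".index(c)  (raises ValueError → none)
def pvBase (c : Char) : Option Int :=
  (PySem.List.index? "ACGT".toList c).map (fun n => (n : Int))

-- v = 0; for c in t: v = 4 * v + "ACGT".index(c)
def pvHorner (t : List Char) : Option Int :=
  t.foldlM (fun v c => (pvBase c).map (fun d => 4 * v + d)) 0

-- result.append(v if len(t) == 1 else v + 4)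
def pvItem (t : List Char) : Option Int :=
  (pvHorner t).map (fun v => if t.length == 1 then v else v + 4)

def codonGenomeToIndices_alt (genome : String) (states : List Int) : List Int :=
  ((pvTokens genome.toList states 0).mapM pvItem).getD []

-- ===== PRECONDITION & SPEC =====
-- Pre_ excludes exactly the inputs on which A raises (IndexError past the end of genome,
-- or KeyError on a consumed character outside "ACGT").
def pvNeed (states : List Int) : Nat :=
  (states.map (fun s => if s == 0 then 1 else 3)).sum

def Pre_codonGenomeToIndices (genome : String) (states : List Int) : Prop :=
  pvNeed states ≤ genome.toList.length ∧
    ((genome.toList.take (pvNeed states)).all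
      (fun c => (['A', 'C', 'G', 'T'] : List Char).contains c)) = true
instance (genome : String) (states : List Int) : Decidable (Pre_codonGenomeToIndices genome states) := by
  unfold Pre_codonGenomeToIndices; infer_instance

def pvWitness_codonGenomeToIndices : String × List Int := ("ACGTA", [0, 1, 0])

def Spec_codonGenomeToIndices (genome : String) (states : List Int) (out : List Int) : Prop := out = codonGenomeToIndices_alt genome states
instance (genome : String) (states : List Int) (out : List Int) : Decidable (Spec_codonGenomeToIndices genome states out) := by unfold Spec_codonGenomeToIndices; infer_instance

-- ===== CLAIM (what is proved, stated in full; the proofs are below) =====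
def Claim_equal_codonGenomeToIndices : Prop := ∀ (genome : String) (states : List Int), Dom_codonGenomeToIndices genome states → Pre_codonGenomeToIndices genome states → Spec_codonGenomeToIndices genome states (codonGenomeToIndices genome states)

-- ===== LEMMAS AND PROOFS =====

-- recursive characterisation of B's two passes fused: run the tokens as they are produced
def pvBRun (g : List Char) : List Int → Int → Option (List Int)
  | [], _ => some []
  | s :: rest, pos =>
    let w : Int := if s == 0 then 1 else 3
    (pvItem (PySem.List.slice g (some pos) (some (pos + w)))).bind fun v =>
      (pvBRun g rest (pos + w)).map (v :: ·)

theorem pvBRun_eq_mapM (g : List Char) : ∀ (states : List Int) (pos : Int),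
    ((pvTokens g states pos).mapM pvItem) = pvBRun g states pos := by
  intro states
  induction states with
  | nil => intro pos; rfl
  | cons s rest ih =>
    intro pos
    simp only [pvTokens, pvBRun, List.mapM_cons, ih]
    cases h : pvItem (PySem.List.slice g (some pos) (some (pos + if s == 0 then 1 else 3))) <;>
      cases h2 : pvBRun g rest (pos + if s == 0 then 1 else 3) <;> simp [Option.bind]

theorem pvNeed_cons (s : Int) (rest : List Int) :
    pvNeed (s :: rest) = (if s == 0 then 1 else 3) + pvNeed rest := by
  simp [pvNeed]

set_option maxRecDepth 100000

-- singleMap lookup agrees with pvItem on its one-character token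
theorem pvSingle_eq (c : Char) (hc : c ∈ (['A', 'C', 'G', 'T'] : List Char)) :
    pvSingleMap.get? c = pvItem [c] := by
  fin_cases hc <;> decide

-- the 64-entry mapping dict agrees with the Horner evaluation (+4) of the token
theorem pvMapping_eq (c0 c1 c2 : Char)
    (h0 : c0 ∈ (['A', 'C', 'G', 'T'] : List Char))
    (h1 : c1 ∈ (['A', 'C', 'G', 'T'] : List Char))
    (h2 : c2 ∈ (['A', 'C', 'G', 'T'] : List Char)) :
    pvMapping.get? (String.ofList [c0, c1, c2]) = pvItem [c0, c1, c2] := by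
  fin_cases h0 <;> fin_cases h1 <;> fin_cases h2 <;> decide

theorem pvMain (g : List Char) : ∀ (states : List Int) (j : Nat),
    (∀ k : Nat, k < pvNeed states → ∃ c, g[j + k]? = some c ∧ c ∈ (['A', 'C', 'G', 'T'] : List Char)) →
    pvALoop g states (j : Int) = pvBRun g states (j : Int) := by
  intro states
  induction states with
  | nil => intro j _; rfl
  | cons s rest ih =>
    intro j hgood
    by_cases hs : s = 0
    · have hsb : (s == 0) = true := by simp [hs]
      obtain ⟨c, hc, hmem⟩ := hgood 0 (by simp only [pvNeed_cons, hsb, if_true]; omega)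
      have hjlt : j < g.length := by
        have := List.getElem?_eq_some_iff.mp (by simpa using hc)
        exact this.1
      have hget : PySem.List.pyGet? g (j : Int) = some c := by
        rw [PySem.List.pyGet?_natCast]; simpa using hc
      have hcast : ((j : Int) + 1) = ((j + 1 : Nat) : Int) := by push_cast; ring
      have hslice : PySem.List.slice g (some (j : Int)) (some ((j : Int) + 1)) = [c] := by
        rw [hcast, PySem.List.slice_natCast]
        rw [List.drop_eq_getElem_cons hjlt]
        have : g[j] = c := by
          have := List.getElem?_eq_some_iff.mp (by simpa using hc)
          exact this.2
        simp [this]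
      have hrest : ∀ k : Nat, k < pvNeed rest →
          ∃ c, g[(j + 1) + k]? = some c ∧ c ∈ (['A', 'C', 'G', 'T'] : List Char) := by
        intro k hk
        have := hgood (1 + k) (by simp only [pvNeed_cons, hsb, if_true]; omega)
        simpa [Nat.add_assoc] using this
      have ihres := ih (j + 1) hrest
      rw [pvALoop, pvBRun]
      simp only [hsb, if_true, hget, Option.bind_some, hslice, pvSingle_eq c hmem]
      rw [hcast, ihres]
    · have hsne : (s == 0) = false := by simp [hs]
      have hneed : 3 ≤ pvNeed (s :: rest) := by
        simp only [pvNeed_cons, hsne, Bool.false_eq_true, if_false]; omega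
      obtain ⟨c0, hc0, hm0⟩ := hgood 0 (by omega)
      obtain ⟨c1, hc1, hm1⟩ := hgood 1 (by omega)
      obtain ⟨c2, hc2, hm2⟩ := hgood 2 (by omega)
      obtain ⟨hl0, he0⟩ := List.getElem?_eq_some_iff.mp (by simpa using hc0 : g[j]? = some c0)
      obtain ⟨hl1, he1⟩ := List.getElem?_eq_some_iff.mp (hc1)
      obtain ⟨hl2, he2⟩ := List.getElem?_eq_some_iff.mp (hc2)
      have hg0 : PySem.List.pyGet? g (j : Int) = some c0 := by
        rw [PySem.List.pyGet?_natCast]; simpa using hc0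
      have hg1 : PySem.List.pyGet? g ((j : Int) + 1) = some c1 := by
        have h : ((j : Int) + 1) = ((j + 1 : Nat) : Int) := by push_cast; ring
        rw [h, PySem.List.pyGet?_natCast]; simpa using hc1
      have hg2 : PySem.List.pyGet? g ((j : Int) + 2) = some c2 := by
        have h : ((j : Int) + 2) = ((j + 2 : Nat) : Int) := by push_cast; ring
        rw [h, PySem.List.pyGet?_natCast]; simpa using hc2
      have hcast : ((j : Int) + 3) = ((j + 3 : Nat) : Int) := by push_cast; ring
      have hslice : PySem.List.slice g (some (j : Int)) (some ((j : Int) + 3)) = [c0, c1, c2] := by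
        rw [hcast, PySem.List.slice_natCast]
        rw [List.drop_eq_getElem_cons hl0]
        have hd1 : g.drop (j + 1) = g[j + 1] :: g.drop (j + 2) := List.drop_eq_getElem_cons hl1
        have hd2 : g.drop (j + 2) = g[j + 2] :: g.drop (j + 3) := List.drop_eq_getElem_cons hl2
        rw [hd1, hd2]
        simp [he0, he1, he2]
      have hrest : ∀ k : Nat, k < pvNeed rest →
          ∃ c, g[(j + 3) + k]? = some c ∧ c ∈ (['A', 'C', 'G', 'T'] : List Char) := by
        intro k hk
        have := hgood (3 + k) (by simp only [pvNeed_cons, hsne, Bool.false_eq_true, if_false]; omega)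
        simpa [Nat.add_assoc] using this
      have ihres := ih (j + 3) hrest
      rw [pvALoop, pvBRun]
      simp only [hsne, Bool.false_eq_true, if_false, hg0, hg1, hg2, Option.bind_some, hslice,
        pvMapping_eq c0 c1 c2 hm0 hm1 hm2]
      rw [hcast, ihres]

-- ===== VERDICT (by name: the statement is the Claim_ definition above) =====
theorem codonGenomeToIndices_spec : Claim_equal_codonGenomeToIndices := by
  intro genome states _ hpre
  obtain ⟨hlen, hgoodb⟩ := hpre
  have hgood : ∀ c ∈ genome.toList.take (pvNeed states), c ∈ (['A', 'C', 'G', 'T'] : List Char) := by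
    simpa using hgoodb
  unfold Spec_codonGenomeToIndices codonGenomeToIndices codonGenomeToIndices_alt
  rw [pvBRun_eq_mapM]
  rw [show ((0 : Int)) = ((0 : Nat) : Int) from rfl, pvMain genome.toList states 0]
  intro k hk
  have hklen : k < genome.toList.length := lt_of_lt_of_le hk hlen
  refine ⟨genome.toList[k], by simp [List.getElem?_eq_getElem hklen], ?_⟩
  apply hgood
  rw [List.mem_take_iff_getElem]
  exact ⟨k, Nat.lt_min.mpr ⟨hk, hklen⟩, by simp⟩
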